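-- pv_equiv track=rewrite | github.com/maplesyrupman/mini_practices | cyclops-numbers.py | is_cyclops
-- ===== SOURCE A (Python) =====
-- def is_cyclops(n):
--     nstring= str(n)
--     mid= len(nstring)//2
--     if nstring[mid] == '0':
--         if len(nstring) == 1:
--             return True
--         for f in nstring[:mid]:
--             if f == '0':
--                 return False
--         reverse= [r for r in nstring[::-1]]
--         for b in reverse[:mid]:
--             if b == '0':
--                 return False
--         return True
--     return False
-- ===== SOURCE B (Python) =====
-- def is_cyclops(n):
--     s = str(n)
--     return len(s) % 2 == 1 and s[len(s) // 2] == '0' and s.count('0') == 1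
-- ===== Notes on version B (the rewrite author's own statement) =====
-- stated objective: simpler
-- what changed: Replaces A's center test plus two explicit half-scans (front slice loop and reversed-copy loop) with a single boolean conjunction: odd length, center digit '0', and exactly one '0' in the whole string.
import Mathlib
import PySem

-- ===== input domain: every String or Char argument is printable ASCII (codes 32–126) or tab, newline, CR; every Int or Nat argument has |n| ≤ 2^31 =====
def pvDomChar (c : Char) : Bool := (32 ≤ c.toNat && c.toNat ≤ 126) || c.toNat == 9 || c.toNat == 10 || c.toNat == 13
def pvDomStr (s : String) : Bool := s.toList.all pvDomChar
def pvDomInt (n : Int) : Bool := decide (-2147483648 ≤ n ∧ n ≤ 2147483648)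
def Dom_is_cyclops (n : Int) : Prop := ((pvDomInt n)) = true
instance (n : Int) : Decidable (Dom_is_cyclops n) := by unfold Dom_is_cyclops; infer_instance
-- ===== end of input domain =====

-- B replaces A's center test plus two half-scans with one conjunction (odd length, '0' center, single '0' overall); objective: simpler.


-- ===== PORT A =====
def is_cyclops (n : Int) : Bool :=
  let nstring := PySem.Int.toChars n
  let mid := nstring.length / 2
  if PySem.List.pyGetD nstring (mid : Int) ' ' = '0' then
    if nstring.length = 1 then true
    else
      -- for f in nstring[:mid]: if f == '0': return False
      if (PySem.List.slice nstring none (some ((mid : Nat) : Int))).any (fun f => f = '0') then false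
      else
        -- reverse = [r for r in nstring[::-1]]; for b in reverse[:mid]: …
        let reverse := nstring.reverse
        if (PySem.List.slice reverse none (some ((mid : Nat) : Int))).any (fun b => b = '0') then false
        else true
  else false

-- ===== PORT B =====
def is_cyclops_alt (n : Int) : Bool :=
  let s := PySem.Int.toChars n
  s.length % 2 == 1 && (PySem.List.pyGetD s ((s.length / 2 : Nat) : Int) ' ' == '0')
    && (s.count '0' == 1)

-- ===== PRECONDITION & SPEC =====
def Spec_is_cyclops (n : Int) (out : Bool) : Prop := out = is_cyclops_alt n
instance (n : Int) (out : Bool) : Decidable (Spec_is_cyclops n out) := by unfold Spec_is_cyclops; infer_instance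

-- ===== CLAIM (what is proved, stated in full; the proofs are below) =====
def Claim_equal_is_cyclops : Prop := ∀ (n : Int), Dom_is_cyclops n → Spec_is_cyclops n (is_cyclops n)

-- ===== LEMMAS AND PROOFS =====

-- core equality over an arbitrary character list
theorem core_eq (s : List Char) :
    (if PySem.List.pyGetD s ((s.length / 2 : Nat) : Int) ' ' = '0' then
      if s.length = 1 then true
      else
        if (PySem.List.slice s none (some ((s.length / 2 : Nat) : Int))).any (fun f => f = '0') then false
        else
          if (PySem.List.slice s.reverse none (some ((s.length / 2 : Nat) : Int))).any (fun b => b = '0') then false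
          else true
    else false)
    = (s.length % 2 == 1 && (PySem.List.pyGetD s ((s.length / 2 : Nat) : Int) ' ' == '0')
        && (s.count '0' == 1)) := by
  by_cases h0 : PySem.List.pyGetD s ((s.length / 2 : Nat) : Int) ' ' = '0'
  case neg =>
    rw [if_neg h0]
    have e2 : (PySem.List.pyGetD s ((s.length / 2 : Nat) : Int) ' ' == '0') = false := by
      simpa using h0
    simp only [e2, Bool.and_false, Bool.false_and]
  case pos =>
    rw [if_pos h0]
    have hne : s ≠ [] := by
      intro he; subst he
      simp [PySem.List.pyGetD, PySem.List.pyGet?, PySem.List.pyIdx?] at h0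
    have hmlt : s.length / 2 < s.length := Nat.div_lt_self (List.length_pos_iff.mpr hne) one_lt_two
    have hget : s[s.length / 2] = '0' := by
      rw [PySem.List.pyGetD_natCast, List.getD_eq_getElem _ _ hmlt] at h0
      exact h0
    have e2 : (PySem.List.pyGetD s ((s.length / 2 : Nat) : Int) ' ' == '0') = true := by
      simpa using h0
    rw [PySem.List.slice_to_natCast, PySem.List.slice_to_natCast]
    rcases Nat.even_or_odd s.length with he | ho
    · -- even length: both sides false
      obtain ⟨m, hm⟩ := he
      have hm1 : 1 ≤ m := by
        rcases Nat.eq_zero_or_pos m with h | h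
        · exfalso; exact hne (List.eq_nil_of_length_eq_zero (by omega))
        · exact h
      have hmid : s.length / 2 = m := by omega
      have hlen1 : s.length ≠ 1 := by omega
      have hback : (s.reverse.take (s.length / 2)).any (fun b => b = '0') = true := by
        rw [List.take_reverse, List.any_eq_true]
        refine ⟨'0', ?_, by simp⟩
        rw [List.mem_reverse]
        have hd : (s.drop (s.length - s.length / 2)).length ≠ 0 := by
          simp; omega
        have h00 : (s.drop (s.length - s.length / 2))[0]'(by omega) = s[s.length / 2] := by
          rw [List.getElem_drop]; congr 1; omega
        rw [← hget, ← h00]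
        exact List.getElem_mem _
      rw [if_neg hlen1]
      have e1 : (s.length % 2 == 1) = false := by
        have : s.length % 2 = 0 := by omega
        simp [this]
      rw [e1, Bool.false_and, Bool.false_and]
      by_cases hf : ((List.take (s.length / 2) s).any fun f => decide (f = '0')) = true
      · rw [if_pos hf]
      · rw [if_neg hf, if_pos hback]
    · -- odd length
      obtain ⟨m, hm⟩ := ho
      have hmid : s.length / 2 = m := by omega
      have hgm : s[m]'(by omega) = '0' := by rw [← hget]; congr 1; omega
      by_cases h1 : s.length = 1
      · rw [if_pos h1]
        rcases s with _ | ⟨c, t⟩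
        · simp at h1
        · have ht : t = [] := by simpa using h1
          subst ht
          have hc : c = '0' := by simpa [hmid] using hget
          subst hc
          simp [h1]
      · rw [if_neg h1]
        have hm1 : 1 ≤ m := by omega
        have e1 : (s.length % 2 == 1) = true := by
          have : s.length % 2 = 1 := by omega
          simp [this]
        have hsplit : s = s.take m ++ '0' :: s.drop (m + 1) := by
          conv_lhs => rw [← List.take_append_drop m s]
          congr 1
          rw [List.drop_eq_getElem_cons (by omega), hgm]
        have hcount : s.count '0' =
            (s.take m).count '0' + 1 + (s.drop (m + 1)).count '0' := by
          conv_lhs => rw [hsplit]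
          simp [List.count_append]
          ring
        have hlm : s.length - m = m + 1 := by omega
        have hback : s.reverse.take m = (s.drop (m + 1)).reverse := by
          rw [List.take_reverse, hlm]
        rw [e1, e2, Bool.true_and, Bool.true_and, hmid, hback, hcount]
        by_cases hA : '0' ∈ s.take m
        · rw [if_pos (by rw [List.any_eq_true]; exact ⟨'0', hA, by simp⟩)]
          have : 1 ≤ (s.take m).count '0' := List.count_pos_iff.mpr hA
          symm
          rw [beq_eq_false_iff_ne]
          omega
        · rw [if_neg (by simp [List.any_eq_true]; exact hA)]
          have hca : (s.take m).count '0' = 0 := List.count_eq_zero.mpr hA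
          by_cases hB : '0' ∈ s.drop (m + 1)
          · rw [if_pos (by rw [List.any_eq_true]; exact ⟨'0', List.mem_reverse.mpr hB, by simp⟩)]
            have : 1 ≤ (s.drop (m + 1)).count '0' := List.count_pos_iff.mpr hB
            symm
            rw [beq_eq_false_iff_ne]
            omega
          · rw [if_neg (by simp [List.any_eq_true]; exact hB)]
            have hcb : (s.drop (m + 1)).count '0' = 0 := List.count_eq_zero.mpr hB
            rw [hca, hcb]
            rfl

theorem is_cyclops_spec : Claim_equal_is_cyclops := by
  intro n _
  unfold Spec_is_cyclops is_cyclops is_cyclops_alt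
  exact core_eq (PySem.Int.toChars n)
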